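-- pv_equiv track=rewrite | github.com/SungHwanYun/Coding-Test-in-One-Volume-with-Python-book- | 9-11.py | solve
-- ===== SOURCE A (Python) =====
-- def get_point(rian, info):
--     rian_point = apeach_point = 0
--
--     for i in range(1, 11, 1):
--         if rian[i] == 0 and info[i] == 0:
--             continue
--
--         if rian[i] > info[i]:
--             rian_point += i
--         else:
--             apeach_point += i
--
--     if rian_point > apeach_point:
--         return rian_point - apeach_point
--     else:
--         return -1
--
-- def solve(rian, n, info):
--     arrow = [-1]
--     point = 0
--
--     if len(rian) == 10:
--         rian.append(n - sum(rian))
--         x = get_point(rian, info)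
--
--         if x > point:
--             point = x
--             arrow = rian[:]
--         rian.pop()
--         return point, arrow
--
--     for i in range(n - sum(rian), -1, -1):
--         rian.append(i)
--         p, a = solve(rian, n, info)
--         if (point < p):
--             point, arrow = p, a
--         rian.pop()
--
--     return point, arrow
-- ===== SOURCE B (Python) =====
-- def get_point(rian, info):
--     idx = range(1, 11)
--     r = sum(i for i in idx if rian[i] > info[i])
--     a = sum(i for i in idx if rian[i] <= info[i] and (rian[i] != 0 or info[i] != 0))
--     return r - a if r > a else -1
--
--
-- def solve(rian, n, info):
--     # iterative DFS with an explicit stack, tracking the best leaf found so far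
--     best = (0, [-1])
--     stack = [list(rian)]
--     while stack:
--         cur = stack.pop()
--         if len(cur) == 10:
--             full = cur + [n - sum(cur)]
--             x = get_point(full, info)
--             if x > best[0]:
--                 best = (x, full)
--         else:
--             rem = n - sum(cur)
--             for i in range(0, rem + 1):
--                 stack.append(cur + [i])
--     return best
-- ===== Notes on version B (the rewrite author's own statement) =====
-- stated objective: alternative
-- what changed: Replaces A's recursive enumeration (each call folding child results upward with append/pop on the shared list) by an iterative depth-first search with an explicit stack of candidate prefixes and a single running best, in the same visit order, and computes get_point via two filtered sums instead of an accumulating loop.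
import Mathlib
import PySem

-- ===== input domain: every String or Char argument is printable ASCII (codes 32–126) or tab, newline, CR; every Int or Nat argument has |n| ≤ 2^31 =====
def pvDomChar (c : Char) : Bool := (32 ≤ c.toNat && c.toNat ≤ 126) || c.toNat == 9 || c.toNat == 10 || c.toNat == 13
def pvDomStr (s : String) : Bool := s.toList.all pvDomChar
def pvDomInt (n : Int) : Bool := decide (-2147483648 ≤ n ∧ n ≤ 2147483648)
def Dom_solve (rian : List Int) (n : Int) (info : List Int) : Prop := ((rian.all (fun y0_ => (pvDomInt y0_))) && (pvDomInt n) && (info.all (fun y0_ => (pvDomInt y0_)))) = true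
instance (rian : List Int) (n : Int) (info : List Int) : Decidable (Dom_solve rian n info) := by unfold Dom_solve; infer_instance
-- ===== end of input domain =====

-- B replaces A's recursion by an iterative depth-first search with an explicit stack and a single
-- running best, in the same visit order (objective: alternative decomposition; return value only —
-- A's append/pop on `rian` is net-neutral, so no observable mutation differs).

-- ===== PORT A =====
def getPoint (rian info : List Int) : Int :=
  let s := (PySem.List.pyRange 1 11 1).foldl
    (fun (s : Int × Int) i =>
      if PySem.List.pyGetD rian i 0 = 0 ∧ PySem.List.pyGetD info i 0 = 0 then s
      else if PySem.List.pyGetD rian i 0 > PySem.List.pyGetD info i 0 then (s.1 + i, s.2)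
      else (s.1, s.2 + i)) (0, 0)
  if s.1 > s.2 then s.1 - s.2 else -1

-- fuel = recursion depth (≤ 11 within Pre_solve: length grows to 10, then the leaf); never exhausted on Pre_ inputs
def solveAux : Nat → List Int → Int → List Int → Int × List Int
  | 0, _, _, _ => (0, [-1])
  | fuel+1, rian, n, info =>
    if rian.length = 10 then
      let full := rian ++ [n - rian.sum]
      let x := getPoint full info
      (if x > 0 then x else 0, if x > 0 then full else [-1])
    else
      (PySem.List.pyRange (n - rian.sum) (-1) (-1)).foldl
        (fun (best : Int × List Int) i =>
          let pa := solveAux fuel (rian ++ [i]) n info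
          if best.1 < pa.1 then pa else best) (0, [-1])

def solve (rian : List Int) (n : Int) (info : List Int) : Int × List Int :=
  solveAux 12 rian n info

-- ===== PORT B =====
def getPointAlt (rian info : List Int) : Int :=
  let idx := PySem.List.pyRange 1 11 1
  let r := (idx.filter (fun i => decide (PySem.List.pyGetD rian i 0 > PySem.List.pyGetD info i 0))).sum
  let a := (idx.filter (fun i => decide (PySem.List.pyGetD rian i 0 ≤ PySem.List.pyGetD info i 0 ∧
              (PySem.List.pyGetD rian i 0 ≠ 0 ∨ PySem.List.pyGetD info i 0 ≠ 0)))).sum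
  if r > a then r - a else -1

-- stack with the top at the head; pushing range(0, rem+1) in order = prepending that range reversed;
-- fuel = number of popped nodes, chosen large enough in solve_alt, never exhausted on Pre_ inputs
def loopAlt : Nat → List (List Int) → Int × List Int → Int → List Int → Int × List Int
  | 0, _, best, _, _ => best
  | _+1, [], best, _, _ => best
  | f+1, cur :: rest, best, n, info =>
    if cur.length = 10 then
      let full := cur ++ [n - cur.sum]
      let x := getPointAlt full info
      loopAlt f rest (if x > best.1 then (x, full) else best) n info
    else
      loopAlt f (((PySem.List.pyRange 0 (n - cur.sum + 1) 1).map (fun i => cur ++ [i])).reverse ++ rest) best n info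

def solve_alt (rian : List Int) (n : Int) (info : List Int) : Int × List Int :=
  loopAlt (((n - rian.sum).toNat + 2) ^ 11 + 1) [rian] (0, [-1]) n info

-- ===== PRECONDITION & SPEC =====
-- Pre_ excludes exactly the inputs where the Python A raises: an IndexError in get_point when a full
-- layout is scored but info has fewer than 11 entries, and a RecursionError when len(rian) > 10 with
-- sum(rian) ≤ n (the recursion then never reaches length 10 and never empties its range).
def Pre_solve (rian : List Int) (n : Int) (info : List Int) : Prop :=
  (rian.length ≤ 10 ∧ 11 ≤ info.length) ∨ (rian.length ≠ 10 ∧ n < rian.sum)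
instance (rian : List Int) (n : Int) (info : List Int) : Decidable (Pre_solve rian n info) := by
  unfold Pre_solve; infer_instance

def pvWitness_solve : List Int × Int × List Int := ([], 3, [0,0,0,0,0,0,0,0,0,0,0])

def Spec_solve (rian : List Int) (n : Int) (info : List Int) (out : Int × List Int) : Prop := out = solve_alt rian n info
instance (rian : List Int) (n : Int) (info : List Int) (out : Int × List Int) : Decidable (Spec_solve rian n info out) := by unfold Spec_solve; infer_instance

-- ===== CLAIM (what is proved, stated in full; the proofs are below) =====
def Claim_equal_solve : Prop := ∀ (rian : List Int) (n : Int) (info : List Int), Dom_solve rian n info → Pre_solve rian n info → Spec_solve rian n info (solve rian n info)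

-- ===== LEMMAS AND PROOFS =====

-- the best-so-far update both programs perform
def comb (b r : Int × List Int) : Int × List Int := if b.1 < r.1 then r else b

theorem comb_assoc (a b c : Int × List Int) : comb (comb a b) c = comb a (comb b c) := by
  unfold comb; split_ifs <;> first | rfl | omega

theorem comb_foldl (g : Int → Int × List Int) (l : List Int) (a b : Int × List Int) :
    comb b (l.foldl (fun acc i => comb acc (g i)) a) = l.foldl (fun acc i => comb acc (g i)) (comb b a) := by
  induction l generalizing a b with
  | nil => rfl
  | cons i t ih => simp only [List.foldl_cons]; rw [ih, comb_assoc]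

def PQ (p : Int × List Int) : Prop := 0 ≤ p.1 ∧ (p.1 = 0 → p.2 = [-1])

theorem comb_PQ {b r : Int × List Int} (hb : PQ b) (hr : PQ r) : PQ (comb b r) := by
  unfold comb; split_ifs <;> assumption

theorem comb_fst_nonneg {b r : Int × List Int} (hb : 0 ≤ b.1) (hr : 0 ≤ r.1) :
    0 ≤ (comb b r).1 := by
  unfold comb; split_ifs <;> omega

theorem comb_zero {r : Int × List Int} (hr : PQ r) : comb ((0 : Int), [(-1 : Int)]) r = r := by
  obtain ⟨h1, h2⟩ := hr
  unfold comb
  split_ifs with h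
  · rfl
  · have : r.1 = 0 := by simp at h ⊢; omega
    have := h2 this
    rw [Prod.ext_iff]; simp [this.symm, ‹r.1 = 0›.symm]

theorem comb_id_right {b : Int × List Int} (hb : 0 ≤ b.1) : comb b ((0 : Int), [(-1 : Int)]) = b := by
  unfold comb; split_ifs with h
  · simp at h; omega
  · rfl

theorem foldl_comb_PQ (g : Int → Int × List Int) (l : List Int) (b : Int × List Int)
    (hb : PQ b) (hg : ∀ x ∈ l, PQ (g x)) :
    PQ (l.foldl (fun acc i => comb acc (g i)) b) := by
  induction l generalizing b with
  | nil => exact hb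
  | cons i t ih =>
    exact ih _ (comb_PQ hb (hg i (by simp))) (fun x hx => hg x (List.mem_cons_of_mem _ hx))

theorem solveAux_PQ (f : Nat) (rian : List Int) (n : Int) (info : List Int) :
    PQ (solveAux f rian n info) := by
  induction f generalizing rian with
  | zero => refine ⟨?_, ?_⟩ <;> simp [solveAux]
  | succ f ih =>
    rw [solveAux]
    split_ifs with hl
    · constructor
      · simp only; split_ifs <;> omega
      · intro h; simp only at h ⊢; split_ifs at h ⊢ <;> first | rfl | omega
    · exact foldl_comb_PQ _ _ _ ⟨by norm_num, fun _ => rfl⟩ (fun i _ => ih _)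

theorem gp_fold (A B : Int → Int) (l : List Int) : ∀ (rp ap : Int),
    l.foldl (fun (s : Int × Int) i =>
      if A i = 0 ∧ B i = 0 then s
      else if A i > B i then (s.1 + i, s.2) else (s.1, s.2 + i)) (rp, ap)
    = (rp + (l.filter (fun i => decide (A i > B i))).sum,
       ap + (l.filter (fun i => decide (A i ≤ B i ∧ (A i ≠ 0 ∨ B i ≠ 0)))).sum) := by
  induction l with
  | nil => simp
  | cons i t ih =>
    intro rp ap
    simp only [List.foldl_cons, List.filter_cons]
    by_cases h0 : A i = 0 ∧ B i = 0
    · have hgt : ¬ A i > B i := by omega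
      have c1 : (decide (A i > B i)) = false := by simp [hgt]
      have c2 : (decide (A i ≤ B i ∧ (A i ≠ 0 ∨ B i ≠ 0))) = false := by simp; omega
      simp only [if_pos h0, c1, c2, Bool.false_eq_true, if_false, ih]
    · by_cases hgt : A i > B i
      · have c1 : (decide (A i > B i)) = true := by simp [hgt]
        have c2 : (decide (A i ≤ B i ∧ (A i ≠ 0 ∨ B i ≠ 0))) = false := by simp; omega
        simp only [if_neg h0, if_pos hgt, c1, c2, Bool.false_eq_true, if_false, if_true, ih,
          List.sum_cons, add_assoc]
      · have c1 : (decide (A i > B i)) = false := by simp [hgt]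
        have c2 : (decide (A i ≤ B i ∧ (A i ≠ 0 ∨ B i ≠ 0))) = true := by
          simp only [not_and_or] at h0; simp; omega
        simp only [if_neg h0, if_neg hgt, c1, c2, Bool.false_eq_true, if_false, if_true, ih,
          List.sum_cons, add_assoc]

theorem getPoint_eq (rian info : List Int) : getPoint rian info = getPointAlt rian info := by
  unfold getPoint getPointAlt
  rw [gp_fold (fun i => PySem.List.pyGetD rian i 0) (fun i => PySem.List.pyGetD info i 0)]
  simp

theorem loopAlt_nil (f : Nat) (best : Int × List Int) (n : Int) (info : List Int) :
    loopAlt f [] best n info = best := by cases f <;> rfl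

theorem solveAux_fuel (d : Nat) : ∀ (cur : List Int) (n : Int) (info : List Int) (f : Nat),
    cur.length + d = 10 → d + 1 ≤ f → solveAux f cur n info = solveAux (d+1) cur n info := by
  induction d with
  | zero =>
    intro cur n info f hlen hf
    obtain ⟨f', rfl⟩ : ∃ f', f = f' + 1 := ⟨f - 1, by omega⟩
    rw [solveAux, solveAux, if_pos (by omega), if_pos (by omega)]
  | succ d ih =>
    intro cur n info f hlen hf
    obtain ⟨f', rfl⟩ : ∃ f', f = f' + 1 := ⟨f - 1, by omega⟩
    rw [solveAux, solveAux, if_neg (by omega), if_neg (by omega)]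
    apply PySem.List.foldl_congr_mem
    intro acc i _
    simp only [ih (cur ++ [i]) n info f' (by simp; omega) (by omega)]

theorem bigstep (n : Int) (info : List Int) : ∀ (d : Nat) (cur : List Int),
    cur.length + d = 10 →
    ∃ c : Nat, c ≤ ((n - cur.sum).toNat + 2) ^ (d+1) ∧
      ∀ (f : Nat) (rest : List (List Int)) (best : Int × List Int), 0 ≤ best.1 →
        loopAlt (c + f) (cur :: rest) best n info
          = loopAlt f rest (comb best (solveAux (d+1) cur n info)) n info := by
  intro d
  induction d with
  | zero =>
    intro cur hlen
    refine ⟨1, Nat.one_le_pow _ _ (by omega), ?_⟩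
    intro f rest best hbest
    rw [show 1 + f = f + 1 from by omega, loopAlt, if_pos (show cur.length = 10 by omega), solveAux,
      if_pos (show cur.length = 10 by omega)]
    simp only [getPoint_eq]
    congr 1
    show (if getPointAlt (cur ++ [n - cur.sum]) info > best.1
            then (getPointAlt (cur ++ [n - cur.sum]) info, cur ++ [n - cur.sum]) else best)
        = comb best
            (if getPointAlt (cur ++ [n - cur.sum]) info > 0 then getPointAlt (cur ++ [n - cur.sum]) info else 0,
             if getPointAlt (cur ++ [n - cur.sum]) info > 0 then cur ++ [n - cur.sum] else [-1])
    unfold comb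
    split_ifs <;> first | rfl | (exfalso; omega)
  | succ d ih =>
    intro cur hlen
    -- children subtree processing, by induction on the list of ring counts
    have inner : ∀ (is : List Int), (∀ i ∈ is, 0 ≤ i) →
        ∃ c : Nat, c ≤ is.length * ((n - cur.sum).toNat + 2) ^ (d+1) ∧
          ∀ (f : Nat) (rest : List (List Int)) (best : Int × List Int), 0 ≤ best.1 →
            loopAlt (c + f) ((is.map (fun i => cur ++ [i])) ++ rest) best n info
              = loopAlt f rest
                  (is.foldl (fun b i => comb b (solveAux (d+1) (cur ++ [i]) n info)) best) n info := by
      intro is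
      induction is with
      | nil => exact fun _ => ⟨0, by simp, fun f rest best _ => by simp⟩
      | cons i t iht =>
        intro hnn
        obtain ⟨c1, hc1, hb1⟩ := ih (cur ++ [i]) (by simp; omega)
        obtain ⟨c2, hc2, hb2⟩ := iht (fun x hx => hnn x (by simp [hx]))
        have hmono : ((n - (cur ++ [i]).sum).toNat + 2) ^ (d+1) ≤ ((n - cur.sum).toNat + 2) ^ (d+1) := by
          apply Nat.pow_le_pow_left
          have h0 : (0:Int) ≤ i := hnn i (by simp)
          simp only [List.sum_append, List.sum_cons, List.sum_nil, add_zero]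
          omega
        refine ⟨c1 + c2, ?_, ?_⟩
        · calc c1 + c2 ≤ ((n - cur.sum).toNat + 2) ^ (d+1) + t.length * ((n - cur.sum).toNat + 2) ^ (d+1) := by
                omega
            _ = (i :: t).length * ((n - cur.sum).toNat + 2) ^ (d+1) := by
                simp [List.length_cons]; ring
        · intro f rest best hbest
          simp only [List.map_cons, List.cons_append, List.foldl_cons]
          rw [show c1 + c2 + f = c1 + (c2 + f) from by omega]
          rw [hb1 _ _ _ hbest]
          exact hb2 f rest _ (comb_fst_nonneg hbest (solveAux_PQ _ _ _ _).1)
    obtain ⟨c, hc, hb⟩ := inner (PySem.List.pyRange (n - cur.sum) (-1) (-1))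
      (fun i hi => by have := (PySem.List.mem_pyRange_neg_one.1 hi).1; omega)
    refine ⟨c + 1, ?_, ?_⟩
    · have hlenr : (PySem.List.pyRange (n - cur.sum) (-1) (-1)).length ≤ (n - cur.sum).toNat + 1 := by
        rw [PySem.List.length_pyRange_neg_one]; omega
      have hP : 1 ≤ ((n - cur.sum).toNat + 2) ^ (d+1) := Nat.one_le_pow _ _ (by omega)
      calc c + 1 ≤ ((n - cur.sum).toNat + 1) * ((n - cur.sum).toNat + 2) ^ (d+1) + 1 := by
            have := Nat.mul_le_mul_right (((n - cur.sum).toNat + 2) ^ (d+1)) hlenr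
            omega
        _ ≤ ((n - cur.sum).toNat + 2) ^ (d+1+1) := by
            have h : ((n - cur.sum).toNat + 2) ^ (d+1+1)
                = ((n - cur.sum).toNat + 1) * ((n - cur.sum).toNat + 2) ^ (d+1)
                  + ((n - cur.sum).toNat + 2) ^ (d+1) := by ring
            rw [h]
            exact Nat.add_le_add_left hP _
    · intro f rest best hbest
      rw [show c + 1 + f = (c + f) + 1 from by omega, loopAlt, if_neg (by omega)]
      have hrev : ((PySem.List.pyRange 0 (n - cur.sum + 1) 1).map (fun i => cur ++ [i])).reverse
          = (PySem.List.pyRange (n - cur.sum) (-1) (-1)).map (fun i => cur ++ [i]) := by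
        rw [PySem.List.pyRange_neg_one_eq_reverse]
        simp [List.map_reverse]
      rw [hrev, hb _ _ _ hbest]
      congr 1
      rw [solveAux, if_neg (by omega)]
      rw [show (fun (best : Int × List Int) i =>
            let pa := solveAux (d+1) (cur ++ [i]) n info
            if best.1 < pa.1 then pa else best)
          = fun (b : Int × List Int) i => comb b (solveAux (d+1) (cur ++ [i]) n info) from rfl]
      rw [comb_foldl, comb_id_right hbest]

-- ===== VERDICT (by name: the statement is the Claim_ definition above) =====
theorem solve_spec : Claim_equal_solve := by
  intro rian n info _ hpre
  unfold Spec_solve solve solve_alt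
  by_cases hl : rian.length ≤ 10
  · -- the normal brute-force case: depth-d tree below the prefix
    set d : Nat := 10 - rian.length with hd
    have hlen : rian.length + d = 10 := by omega
    obtain ⟨c, hc, hb⟩ := bigstep n info d rian hlen
    have hcle : c ≤ ((n - rian.sum).toNat + 2) ^ 11 := by
      calc c ≤ ((n - rian.sum).toNat + 2) ^ (d+1) := hc
        _ ≤ ((n - rian.sum).toNat + 2) ^ 11 :=
            Nat.pow_le_pow_right (by omega) (by omega)
    rw [show ((n - rian.sum).toNat + 2) ^ 11 + 1 = c + (((n - rian.sum).toNat + 2) ^ 11 + 1 - c) from by omega]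
    rw [hb _ _ _ (by norm_num), loopAlt_nil]
    rw [comb_zero (solveAux_PQ _ _ _ _)]
    exact solveAux_fuel d rian n info 12 hlen (by omega)
  · -- len(rian) > 10: Pre_ forces n < sum(rian); both programs do no work and return (0, [-1])
    have hns : n < rian.sum := by
      rcases hpre with ⟨h, _⟩ | ⟨_, h⟩
      · omega
      · exact h
    rw [solveAux, if_neg (by omega), PySem.List.pyRange_neg_one_eq_nil (by omega), List.foldl_nil]
    rw [show ((n - rian.sum).toNat + 2) ^ 11 + 1 = (((n - rian.sum).toNat + 2) ^ 11) + 1 from rfl]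
    rw [loopAlt, if_neg (by omega), PySem.List.pyRange_one_eq_nil (by omega)]
    simp [loopAlt_nil]
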